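-- pv_equiv track=rewrite | github.com/miliar/Code_Jam_Webscraper | solutions_python/Problem_201/649.py | find_ls_rs
-- ===== SOURCE A (Python) =====
-- def find_ls_rs(N, level, people_left):
--     num_of_max = 1
--     current_max = N
--     for i in range(0, level):
--         # count how many maximums will be created
--         if current_max%2 == 1:
--             num_of_max = 2*num_of_max + (2**i - num_of_max) # i is actually how many levels exist already (before the one
--             # I check right now). So 2^i is the number of tree "fathers"
--         # if current_max%2 == 0 nothing changes =>  even numbers cause 1 maximum in the next level
--         current_max //= 2
--
--     if people_left > num_of_max:
--         current_max -= 1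
--
--     max = current_max // 2
--     min = current_max -1 -max
--     return max, min
-- ===== SOURCE B (Python) =====
-- def find_ls_rs(N, level, people_left):
--     # closed form: after `level` halvings current_max = N // 2**level,
--     # and the loop's accumulated count equals 1 + N % 2**level
--     p = 2 ** max(level, 0)
--     num_of_max = 1 + N % p
--     current_max = N // p
--     if people_left > num_of_max:
--         current_max -= 1
--     mx = current_max // 2
--     mn = current_max - 1 - mx
--     return mx, mn
-- ===== Notes on version B (the rewrite author's own statement) =====
-- stated objective: faster
-- what changed: Replaces the per-level loop with a closed form: current_max = N // 2**level and num_of_max = 1 + N % 2**level (the loop adds 2^i exactly when bit i of N is set); the tail split is unchanged.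
import Mathlib
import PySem

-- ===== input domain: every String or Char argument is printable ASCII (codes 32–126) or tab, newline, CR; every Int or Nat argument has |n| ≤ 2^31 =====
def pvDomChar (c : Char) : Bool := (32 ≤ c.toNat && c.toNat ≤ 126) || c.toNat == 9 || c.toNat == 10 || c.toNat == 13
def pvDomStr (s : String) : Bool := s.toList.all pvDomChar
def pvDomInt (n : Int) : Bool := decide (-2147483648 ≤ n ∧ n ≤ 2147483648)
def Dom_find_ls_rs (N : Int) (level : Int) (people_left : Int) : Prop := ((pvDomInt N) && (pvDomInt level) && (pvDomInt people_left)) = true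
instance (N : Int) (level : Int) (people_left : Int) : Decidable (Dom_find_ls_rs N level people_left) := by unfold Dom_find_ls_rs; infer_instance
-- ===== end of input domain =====

-- B replaces A's per-level loop by the closed form N // 2**level, N % 2**level; objective: faster (O(1) arithmetic vs O(level) loop).

-- ===== PORT A =====
-- loop body of A; `2**i` is ported as 2 ^ i.toNat, exact since i ranges over range(0, level), so i ≥ 0
def pvStepA (st : Int × Int) (i : Int) : Int × Int :=
  let num := if PySem.Int.mod st.2 2 = 1 then 2 * st.1 + ((2 : Int) ^ i.toNat - st.1) else st.1
  (num, PySem.Int.floordiv st.2 2)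

def find_ls_rs (N : Int) (level : Int) (people_left : Int) : Int × Int :=
  let st := (PySem.List.pyRange 0 level 1).foldl pvStepA (1, N)
  let current_max := if people_left > st.1 then st.2 - 1 else st.2
  let mx := PySem.Int.floordiv current_max 2
  let mn := current_max - 1 - mx
  (mx, mn)

-- ===== PORT B =====
def find_ls_rs_alt (N : Int) (level : Int) (people_left : Int) : Int × Int :=
  let p : Int := 2 ^ (max level 0).toNat   -- 2 ** max(level, 0)
  let num_of_max := 1 + PySem.Int.mod N p
  let current_max0 := PySem.Int.floordiv N p
  let current_max := if people_left > num_of_max then current_max0 - 1 else current_max0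
  let mx := PySem.Int.floordiv current_max 2
  let mn := current_max - 1 - mx
  (mx, mn)

-- ===== PRECONDITION & SPEC =====
def Spec_find_ls_rs (N : Int) (level : Int) (people_left : Int) (out : Int × Int) : Prop := out = find_ls_rs_alt N level people_left
instance (N : Int) (level : Int) (people_left : Int) (out : Int × Int) : Decidable (Spec_find_ls_rs N level people_left out) := by unfold Spec_find_ls_rs; infer_instance

-- ===== CLAIM (what is proved, stated in full; the proofs are below) =====
def Claim_equal_find_ls_rs : Prop := ∀ (N : Int) (level : Int) (people_left : Int), Dom_find_ls_rs N level people_left → Spec_find_ls_rs N level people_left (find_ls_rs N level people_left)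

-- ===== LEMMAS AND PROOFS =====

-- splitting one halving step off a floor-div/mod by 2*k
theorem pv_split_step (N k : Int) (hk : 0 < k) :
    N % (2 * k) = N % k + k * ((N / k) % 2) ∧ N / (2 * k) = N / k / 2 := by
  have h1 : k * (N / k) + N % k = N := Int.ediv_add_emod N k
  have h2 : 2 * ((N / k) / 2) + (N / k) % 2 = N / k := Int.ediv_add_emod (N / k) 2
  have hr0 : 0 ≤ N % k := Int.emod_nonneg N (ne_of_gt hk)
  have hr1 : N % k < k := Int.emod_lt_of_pos N hk
  have hb : (N / k) % 2 = 0 ∨ (N / k) % 2 = 1 := by omega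
  have h2k : (2 : Int) * k ≠ 0 := by positivity
  rcases hb with hb | hb <;>
  · have hN : N = (k * ((N / k) % 2) + N % k) + 2 * k * ((N / k) / 2) := by
      linear_combination -h1 - k * h2
    rw [hb] at hN
    constructor
    · conv_lhs => rw [hN]
      rw [Int.add_mul_emod_self_left, Int.emod_eq_of_lt (by omega) (by omega), hb]
      ring
    · conv_lhs => rw [hN]
      rw [Int.add_mul_ediv_left _ _ h2k, Int.ediv_eq_zero_of_lt (by omega) (by omega)]
      omega

-- the loop of A computes the closed form
theorem pv_loop (l : Nat) (N : Int) :
    (PySem.List.pyRange 0 (l : Int) 1).foldl pvStepA (1, N)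
      = (1 + N % (2 ^ l : Int), N / (2 ^ l : Int)) := by
  induction l with
  | zero => simp [PySem.List.pyRange_one_eq_nil (by norm_num : (0:Int) ≤ 0)]
  | succ l ih =>
    have hcast : ((l + 1 : Nat) : Int) = (l : Int) + 1 := by push_cast; ring
    rw [hcast, PySem.List.pyRange_one_succ_right (by positivity), List.foldl_append, ih]
    have hk : (0 : Int) < 2 ^ l := by positivity
    obtain ⟨hm, hd⟩ := pv_split_step N (2 ^ l) hk
    have hmod2 : PySem.Int.mod (N / (2 ^ l : Int)) 2 = (N / (2 ^ l : Int)) % 2 :=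
      PySem.Int.mod_eq_emod_of_pos (by norm_num)
    have hfd : PySem.Int.floordiv (N / (2 ^ l : Int)) 2 = (N / (2 ^ l : Int)) / 2 :=
      PySem.Int.floordiv_eq_ediv_of_pos (by norm_num)
    have hb : (N / (2 ^ l : Int)) % 2 = 0 ∨ (N / (2 ^ l : Int)) % 2 = 1 := by omega
    have hpow : (2 : Int) ^ (l + 1) = 2 * 2 ^ l := by ring
    simp only [List.foldl_cons, List.foldl_nil, pvStepA, hmod2, hfd, Int.toNat_natCast,
      hpow, hm, hd]
    rcases hb with hb | hb <;> rw [hb] <;> simp [Prod.mk.injEq] <;> ring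

theorem find_ls_rs_eq (N level people_left : Int) :
    find_ls_rs N level people_left = find_ls_rs_alt N level people_left := by
  have hrange : PySem.List.pyRange 0 level 1 = PySem.List.pyRange 0 (level.toNat : Int) 1 := by
    rcases le_or_gt level 0 with h | h
    · rw [PySem.List.pyRange_one_eq_nil h, Int.toNat_of_nonpos h]
      simp [PySem.List.pyRange_one_eq_nil]
    · rw [Int.toNat_of_nonneg (le_of_lt h)]
  have hmax : (max level 0).toNat = level.toNat := by omega
  have hk : (0 : Int) < 2 ^ level.toNat := by positivity
  unfold find_ls_rs find_ls_rs_alt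
  rw [hrange, pv_loop, hmax]
  simp only [PySem.Int.mod_eq_emod_of_pos hk, PySem.Int.floordiv_eq_ediv_of_pos hk]

-- ===== VERDICT (by name: the statement is the Claim_ definition above) =====
theorem find_ls_rs_spec : Claim_equal_find_ls_rs := by
  intro N level people_left _
  unfold Spec_find_ls_rs
  exact find_ls_rs_eq N level people_left
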